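-- pv_equiv track=rewrite | github.com/sachinpatel-debug/Derivative-Calculator | Derivative_Calc_backend.py | plus_not_on_level
-- ===== SOURCE A (Python) =====
-- def plus_not_on_level(substring):
--     op_list = ['+']
--     parenth_unresolved = 0
--     for char in substring:
--         if char == "(":
--             parenth_unresolved += 1
--         if char == ")":
--             parenth_unresolved -= 1
--         if char in op_list:
--             if parenth_unresolved == 1:
--                 return False
--     return True
-- ===== SOURCE B (Python) =====
-- def plus_not_on_level(substring):
--     for i, ch in enumerate(substring):
--         if ch == '+' and substring.count('(', 0, i) - substring.count(')', 0, i) == 1: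
--             return False
--     return True
-- ===== Notes on version B (the rewrite author's own statement) =====
-- stated objective: simpler
-- what changed: B keeps no running depth state: at each plus sign it computes the parenthesis depth directly as a prefix-count difference with str.count over the prefix, replacing A's stateful depth-tracking loop.
import Mathlib
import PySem

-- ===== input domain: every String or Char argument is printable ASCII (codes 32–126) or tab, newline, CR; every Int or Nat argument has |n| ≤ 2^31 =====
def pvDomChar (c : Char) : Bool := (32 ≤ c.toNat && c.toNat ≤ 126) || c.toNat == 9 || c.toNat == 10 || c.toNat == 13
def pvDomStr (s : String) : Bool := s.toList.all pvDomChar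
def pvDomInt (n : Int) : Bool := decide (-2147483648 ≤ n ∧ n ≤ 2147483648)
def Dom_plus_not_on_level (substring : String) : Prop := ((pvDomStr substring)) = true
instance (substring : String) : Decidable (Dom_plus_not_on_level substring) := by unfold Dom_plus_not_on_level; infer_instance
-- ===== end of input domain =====

-- B keeps no running depth state: at each '+' it computes the depth as a
-- prefix parenthesis-count difference (str.count on the prefix); simpler, same result.

-- ===== PORT A =====
-- A's loop: thread parenth_unresolved through the characters, returning False early.
def plus_not_on_level_loop : List Char → Int → Bool
  | [], _ => true
  | c :: rest, d =>
    let d1 := if c = '(' then d + 1 else d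
    let d2 := if c = ')' then d1 - 1 else d1
    if c = '+' then
      if d2 = 1 then false else plus_not_on_level_loop rest d2
    else plus_not_on_level_loop rest d2

def plus_not_on_level (substring : String) : Bool :=
  plus_not_on_level_loop substring.toList 0

-- ===== PORT B =====
-- B's enumerate loop: for each index i with character '+', test whether
-- count('(') - count(')') over the prefix substring[:i] equals 1.
def plus_not_on_level_alt_loop (full : List Char) : List Char → Nat → Bool
  | [], _ => true
  | c :: rest, i =>
    if c = '+' ∧ ((full.take i).count '(' : Int) - ((full.take i).count ')' : Int) = 1
    then false
    else plus_not_on_level_alt_loop full rest (i + 1)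

def plus_not_on_level_alt (substring : String) : Bool :=
  plus_not_on_level_alt_loop substring.toList substring.toList 0

-- ===== PRECONDITION & SPEC =====
def Spec_plus_not_on_level (substring : String) (out : Bool) : Prop := out = plus_not_on_level_alt substring
instance (substring : String) (out : Bool) : Decidable (Spec_plus_not_on_level substring out) := by unfold Spec_plus_not_on_level; infer_instance

-- ===== CLAIM (what is proved, stated in full; the proofs are below) =====
def Claim_equal_plus_not_on_level : Prop := ∀ (substring : String), Dom_plus_not_on_level substring → Spec_plus_not_on_level substring (plus_not_on_level substring)

-- ===== LEMMAS AND PROOFS =====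
-- prefix depth of a list of characters
def pvDiff (l : List Char) : Int := (l.count '(' : Int) - (l.count ')' : Int)

lemma pvDiff_append_singleton (pre : List Char) (c : Char) :
    pvDiff (pre ++ [c]) =
      (if c = ')' then (if c = '(' then pvDiff pre + 1 else pvDiff pre) - 1
       else (if c = '(' then pvDiff pre + 1 else pvDiff pre)) := by
  unfold pvDiff
  simp only [List.count_append, List.count_singleton]
  split_ifs <;> simp_all <;> omega

lemma alt_loop_eq_loop (l pre : List Char) :
    plus_not_on_level_alt_loop (pre ++ l) l pre.length =
      plus_not_on_level_loop l (pvDiff pre) := by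
  induction l generalizing pre with
  | nil => simp [plus_not_on_level_alt_loop, plus_not_on_level_loop]
  | cons c rest ih =>
    simp only [plus_not_on_level_alt_loop, plus_not_on_level_loop]
    have htake : (pre ++ c :: rest).take pre.length = pre := by
      simp
    have hassoc : pre ++ c :: rest = (pre ++ [c]) ++ rest := by simp
    have hlen : pre.length + 1 = (pre ++ [c]).length := by simp
    have hrec : plus_not_on_level_alt_loop (pre ++ c :: rest) rest (pre.length + 1) =
        plus_not_on_level_loop rest (pvDiff (pre ++ [c])) := by
      rw [hassoc, hlen]; exact ih (pre ++ [c])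
    rw [htake, hrec, pvDiff_append_singleton]
    by_cases hc : c = '+'
    · subst hc
      by_cases hd : pvDiff pre = 1 <;>
        · simp only [pvDiff] at hd
          simp [hd, pvDiff]
    · simp [hc]

-- ===== VERDICT (by name: the statement is the Claim_ definition above) =====
theorem plus_not_on_level_spec : Claim_equal_plus_not_on_level := by
  intro s _
  unfold Spec_plus_not_on_level plus_not_on_level plus_not_on_level_alt
  have := alt_loop_eq_loop s.toList []
  simpa [pvDiff] using this.symm
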